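-- pv_equiv track=rewrite | github.com/pm4py/pm4py-core | pm4py/objects/dfg/utils/dfg_utils.py | sum_end_activities_count
-- ===== SOURCE A (Python) =====
-- def get_outgoing_edges(dfg):
--     """
--     Gets outgoing edges of the provided DFG graph
--     """
--     outgoing = {}
--     for el in dfg:
--         if type(el[0]) is str:
--             if not el[0] in outgoing:
--                 outgoing[el[0]] = {}
--             outgoing[el[0]][el[1]] = dfg[el]
--         else:
--             if not el[0][0] in outgoing:
--                 outgoing[el[0][0]] = {}
--             outgoing[el[0][0]][el[0][1]] = el[1]
--     return outgoing
--
-- def get_ingoing_edges(dfg):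
--     """
--     Get ingoing edges of the provided DFG graph
--     """
--     ingoing = {}
--     for el in dfg:
--         if type(el[0]) is str:
--             if not el[1] in ingoing:
--                 ingoing[el[1]] = {}
--             ingoing[el[1]][el[0]] = dfg[el]
--         else:
--             if not el[0][1] in ingoing:
--                 ingoing[el[0][1]] = {}
--             ingoing[el[0][1]][el[0][0]] = el[1]
--     return ingoing
--
-- def sum_end_activities_count(dfg):
--     """
--     Gets the sum of end attributes count inside a DFG
--
--     Parameters
--     -------------
--     dfg
--         Directly-Follows graph
--
--     Returns
--     -------------
--         Sum of start attributes count
--     """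
--     ingoing = get_ingoing_edges(dfg)
--     outgoing = get_outgoing_edges(dfg)
--
--     sum_values = 0
--
--     for act in ingoing:
--         if act not in outgoing:
--             for act2 in ingoing[act]:
--                 sum_values += ingoing[act][act2]
--
--     return sum_values
-- ===== SOURCE B (Python) =====
-- def sum_end_activities_count(dfg):
--     """
--     Gets the sum of end attributes count inside a DFG
--
--     Single pass to collect source activities, then one summing pass over the
--     edges whose target is never a source; no nested ingoing/outgoing dicts.
--     """
--     sources = set()
--     for el in dfg:
--         sources.add(el[0] if type(el[0]) is str else el[0][0])
--     total = 0
--     for el in dfg: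
--         if type(el[0]) is str:
--             target, weight = el[1], dfg[el]
--         else:
--             target, weight = el[0][1], el[1]
--         if target not in sources:
--             total += weight
--     return total
-- ===== Notes on version B (the rewrite author's own statement) =====
-- stated objective: simpler
-- what changed: Replaces the two nested dicts built by get_ingoing_edges/get_outgoing_edges with one pass collecting a flat set of source activities and one summing pass over edges whose target is not a source.
import Mathlib
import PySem

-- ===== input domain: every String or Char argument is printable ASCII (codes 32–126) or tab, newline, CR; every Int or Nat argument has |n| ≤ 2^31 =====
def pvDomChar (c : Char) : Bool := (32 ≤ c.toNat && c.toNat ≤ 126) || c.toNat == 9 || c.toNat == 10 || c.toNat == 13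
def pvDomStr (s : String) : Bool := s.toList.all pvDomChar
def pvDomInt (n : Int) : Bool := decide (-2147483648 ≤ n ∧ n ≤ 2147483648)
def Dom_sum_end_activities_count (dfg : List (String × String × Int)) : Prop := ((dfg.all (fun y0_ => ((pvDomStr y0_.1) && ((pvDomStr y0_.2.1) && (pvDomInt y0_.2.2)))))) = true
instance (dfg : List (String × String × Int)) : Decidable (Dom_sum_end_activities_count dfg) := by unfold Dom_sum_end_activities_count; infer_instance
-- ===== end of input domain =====

-- B replaces A's two nested ingoing/outgoing dicts by a flat set of sources and one summing pass (simpler; measured faster by a constant factor).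

-- ===== PORT A =====
-- The Python argument is a dict[(str,str), int]; under the type convention it arrives as an
-- association list, which we reconstitute as a PySem.Dict (Python dict(), last value wins, key keeps first position).
-- get_ingoing_edges: for el in dfg: (el[0] is a str here) if el[1] not in ingoing: ingoing[el[1]] = {}; ingoing[el[1]][el[0]] = dfg[el]
def pvIngoing (d : PySem.Dict (String × String) Int) : PySem.Dict String (PySem.Dict String Int) :=
  d.keys.foldl (fun ing el =>
    let ing := if ing.contains el.2 then ing else ing.insert el.2 PySem.Dict.empty
    ing.insert el.2 ((ing.getD el.2 PySem.Dict.empty).insert el.1 (d.getD el 0))) PySem.Dict.empty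

-- get_outgoing_edges: symmetric
def pvOutgoing (d : PySem.Dict (String × String) Int) : PySem.Dict String (PySem.Dict String Int) :=
  d.keys.foldl (fun outg el =>
    let outg := if outg.contains el.1 then outg else outg.insert el.1 PySem.Dict.empty
    outg.insert el.1 ((outg.getD el.1 PySem.Dict.empty).insert el.2 (d.getD el 0))) PySem.Dict.empty

def sum_end_activities_count (dfg : List (String × String × Int)) : Int :=
  let d : PySem.Dict (String × String) Int :=
    PySem.Dict.ofList (dfg.map (fun t => ((t.1, t.2.1), t.2.2)))
  let ingoing := pvIngoing d
  let outgoing := pvOutgoing d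
  ingoing.keys.foldl (fun sum_values act =>
    if outgoing.contains act then sum_values
    else (ingoing.getD act PySem.Dict.empty).keys.foldl
      (fun s act2 => s + (ingoing.getD act PySem.Dict.empty).getD act2 0) sum_values) 0

-- ===== PORT B =====
def sum_end_activities_count_alt (dfg : List (String × String × Int)) : Int :=
  let d : PySem.Dict (String × String) Int :=
    PySem.Dict.ofList (dfg.map (fun t => ((t.1, t.2.1), t.2.2)))
  -- sources = set(); for el in dfg: sources.add(el[0])   (el[0] is the source activity, a str here)
  let sources : PySem.Set String :=
    d.keys.foldl (fun s el => PySem.Set.add s el.1) PySem.Set.empty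
  -- total = 0; for el in dfg: if el[1] not in sources: total += dfg[el]
  d.keys.foldl (fun total el =>
    if PySem.Set.contains sources el.2 then total else total + d.getD el 0) 0

-- ===== PRECONDITION & SPEC =====
def Spec_sum_end_activities_count (dfg : List (String × String × Int)) (out : Int) : Prop := out = sum_end_activities_count_alt dfg
instance (dfg : List (String × String × Int)) (out : Int) : Decidable (Spec_sum_end_activities_count dfg out) := by unfold Spec_sum_end_activities_count; infer_instance

-- ===== CLAIM (what is proved, stated in full; the proofs are below) =====
def Claim_equal_sum_end_activities_count : Prop := ∀ (dfg : List (String × String × Int)), Dom_sum_end_activities_count dfg → Spec_sum_end_activities_count dfg (sum_end_activities_count dfg)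

-- ===== LEMMAS AND PROOFS =====

-- Proof-side simple form of get_ingoing_edges (the conditional pre-insert collapsed).
def pvIngS (L : List ((String × String) × Int)) : PySem.Dict String (PySem.Dict String Int) :=
  L.foldl (fun ing e => ing.insert e.1.2 ((ing.getD e.1.2 PySem.Dict.empty).insert e.1.1 e.2)) PySem.Dict.empty

-- Sum of the ingoing-edge weights recorded for one activity.
def pvITot (d : PySem.Dict String (PySem.Dict String Int)) (act : String) : Int :=
  ((d.getD act PySem.Dict.empty).keys.map (fun a2 => (d.getD act PySem.Dict.empty).getD a2 0)).sum

lemma pvIngoing_eq (d : PySem.Dict (String × String) Int) (hnd : d.keys.Nodup) :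
    pvIngoing d = pvIngS d.items := by
  unfold pvIngoing pvIngS
  have hkeys : d.keys = d.items.map Prod.fst := rfl
  rw [hkeys, List.foldl_map]
  apply PySem.List.foldl_congr_mem
  intro acc e he
  have hv : d.getD e.1 0 = e.2 :=
    PySem.Dict.getD_of_mem_items d (by simpa using he) hnd 0
  by_cases hc : acc.contains e.1.2
  · simp [hc, hv]
  · simp only [Bool.not_eq_true] at hc
    simp [hc, hv, PySem.Dict.getD_of_not_contains acc PySem.Dict.empty hc,
      PySem.Dict.insert_insert_self]

lemma contains_pvOutgoing (d : PySem.Dict (String × String) Int) (act : String) :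
    (pvOutgoing d).contains act = true ↔ act ∈ d.keys.map (fun el => el.1) := by
  have hstep : pvOutgoing d
      = d.keys.foldl (fun outg el =>
          outg.insert el.1 ((outg.getD el.1 PySem.Dict.empty).insert el.2 (d.getD el 0)))
        PySem.Dict.empty := by
    unfold pvOutgoing
    apply PySem.List.foldl_congr_mem
    intro acc el _
    by_cases hc : acc.contains el.1
    · simp [hc]
    · simp only [Bool.not_eq_true] at hc
      simp [hc, PySem.Dict.getD_of_not_contains acc PySem.Dict.empty hc,
        PySem.Dict.insert_insert_self]
  rw [hstep, PySem.Dict.contains_iff_mem_keys,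
    PySem.Dict.keys_foldl_insert_key d.keys (fun el => el.1) _ PySem.Dict.empty]
  have : (PySem.Dict.empty : PySem.Dict String (PySem.Dict String Int)).keys = [] := rfl
  rw [this]
  constructor
  · intro hm
    exact (PySem.Set.mem_ofList ..).mp (by simpa [PySem.Set.update_nil_left] using hm)
  · intro hm
    simpa [PySem.Set.update_nil_left] using (PySem.Set.mem_ofList ..).mpr hm

lemma contains_pvIngS_inner (L : List ((String × String) × Int)) (a b : String) :
    ((pvIngS L).getD b PySem.Dict.empty).contains a = true ↔ (a, b) ∈ L.map Prod.fst := by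
  induction L using List.reverseRecOn with
  | nil => simp [pvIngS]
  | append_singleton M e ih =>
    have hstep : pvIngS (M ++ [e])
        = (pvIngS M).insert e.1.2 (((pvIngS M).getD e.1.2 PySem.Dict.empty).insert e.1.1 e.2) := by
      simp [pvIngS, List.foldl_append]
    rw [hstep]
    by_cases hb : b = e.1.2
    · subst hb
      rw [PySem.Dict.getD_insert_self, PySem.Dict.contains_insert]
      simp only [List.map_append, List.map_singleton, List.mem_append, List.mem_singleton,
        Bool.or_eq_true, beq_iff_eq, ih]
      constructor
      · rintro (h1 | h2)
        · right; rw [h1]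
        · left; exact h2
      · rintro (h1 | h2)
        · right; exact h1
        · left; exact (Prod.ext_iff.mp h2).1
    · rw [PySem.Dict.getD_insert_of_ne _ _ _ hb, ih]
      simp only [List.map_append, List.map_singleton, List.mem_append, List.mem_singleton]
      constructor
      · exact Or.inl
      · rintro (h1 | h2)
        · exact h1
        · exact absurd (Prod.ext_iff.mp h2).2 hb

lemma nodup_keys_pvIngS (L : List ((String × String) × Int)) : (pvIngS L).keys.Nodup := by
  exact PySem.Dict.nodup_keys_foldl_insert_key L (fun e => e.1.2)
    (fun ing e => (ing.getD e.1.2 PySem.Dict.empty).insert e.1.1 e.2)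
    PySem.Dict.empty PySem.Dict.nodup_keys_empty

lemma pv_sum_map_change {ks : List String} {b : String} {c : Int} (F F' : String → Int)
    (hnd : ks.Nodup) (hb : b ∈ ks)
    (hne : ∀ x ∈ ks, x ≠ b → F' x = F x) (hbv : F' b = F b + c) :
    (ks.map F').sum = (ks.map F).sum + c := by
  induction ks with
  | nil => simp at hb
  | cons k ks ih =>
    rcases List.nodup_cons.mp hnd with ⟨hk, hnd'⟩
    rcases List.mem_cons.mp hb with hkb | hb'
    · subst hkb
      have : ks.map F' = ks.map F := by
        apply List.map_congr_left
        intro x hx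
        exact hne x (List.mem_cons_of_mem _ hx) (fun hxb => hk (hxb ▸ hx))
      simp [this, hbv]; ring
    · have hkne : k ≠ b := fun h => hk (h ▸ hb')
      have := ih hnd' hb' (fun x hx hxb => hne x (List.mem_cons_of_mem _ hx) hxb)
      simp [hne k (List.mem_cons_self) hkne, this]; ring

lemma pv_itot_insert_fresh (inner : PySem.Dict String Int) (a : String) (w : Int)
    (h : inner.contains a = false) :
    ((inner.insert a w).keys.map (fun a2 => (inner.insert a w).getD a2 0)).sum
      = (inner.keys.map (fun a2 => inner.getD a2 0)).sum + w := by
  have hmem : a ∉ inner.keys := by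
    intro hm
    exact absurd ((PySem.Dict.contains_iff_mem_keys inner a).mpr hm) (by simp [h])
  rw [PySem.Dict.keys_insert_of_not_contains inner w h, List.map_append]
  have hcongr : inner.keys.map (fun a2 => (inner.insert a w).getD a2 0)
      = inner.keys.map (fun a2 => inner.getD a2 0) := by
    apply List.map_congr_left
    intro x hx
    exact PySem.Dict.getD_insert_of_ne inner w 0 (fun hxa => hmem (hxa ▸ hx))
  simp [hcongr, PySem.Dict.getD_insert_self]

lemma pv_main (L : List ((String × String) × Int)) (p : String → Bool)
    (hnd : (L.map Prod.fst).Nodup) :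
    ((pvIngS L).keys.map (fun act => if p act then 0 else pvITot (pvIngS L) act)).sum
      = (L.map (fun e => if p e.1.2 then (0 : Int) else e.2)).sum := by
  induction L using List.reverseRecOn with
  | nil => simp [pvIngS]
  | append_singleton M e ih =>
    rw [List.map_append] at hnd
    have hndM : (M.map Prod.fst).Nodup := (List.nodup_append.mp hnd).1
    have hfreshKey : e.1 ∉ M.map Prod.fst := by
      intro hm
      exact (List.nodup_append.mp hnd).2.2 e.1 hm e.1 (by simp) rfl
    have hstep : pvIngS (M ++ [e])
        = (pvIngS M).insert e.1.2 (((pvIngS M).getD e.1.2 PySem.Dict.empty).insert e.1.1 e.2) := by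
      simp [pvIngS, List.foldl_append]
    have hfresh : ((pvIngS M).getD e.1.2 PySem.Dict.empty).contains e.1.1 = false := by
      rw [Bool.eq_false_iff]
      intro hc
      exact hfreshKey (by simpa using (contains_pvIngS_inner M e.1.1 e.1.2).mp hc)
    have hRHS : ((M ++ [e]).map (fun e => if p e.1.2 then (0 : Int) else e.2)).sum
        = (M.map (fun e => if p e.1.2 then (0 : Int) else e.2)).sum
          + (if p e.1.2 then (0 : Int) else e.2) := by
      simp
    rw [hRHS, ← ih hndM, hstep]
    by_cases hc : (pvIngS M).contains e.1.2
    · rw [PySem.Dict.keys_insert_of_contains _ _ hc]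
      apply pv_sum_map_change
        (fun act => if p act then 0 else pvITot (pvIngS M) act)
        (fun act => if p act then 0 else
          pvITot ((pvIngS M).insert e.1.2
            (((pvIngS M).getD e.1.2 PySem.Dict.empty).insert e.1.1 e.2)) act)
        (nodup_keys_pvIngS M) ((PySem.Dict.contains_iff_mem_keys _ _).mp hc)
      · intro x _ hxne
        have : ((pvIngS M).insert e.1.2
            (((pvIngS M).getD e.1.2 PySem.Dict.empty).insert e.1.1 e.2)).getD x PySem.Dict.empty
            = (pvIngS M).getD x PySem.Dict.empty :=
          PySem.Dict.getD_insert_of_ne _ _ _ hxne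
        simp only [pvITot, this]
      · have hD' : ((pvIngS M).insert e.1.2
            (((pvIngS M).getD e.1.2 PySem.Dict.empty).insert e.1.1 e.2)).getD e.1.2 PySem.Dict.empty
            = ((pvIngS M).getD e.1.2 PySem.Dict.empty).insert e.1.1 e.2 :=
          PySem.Dict.getD_insert_self _ _ _ _
        simp only [pvITot, hD', pv_itot_insert_fresh _ _ _ hfresh]
        by_cases hp : p e.1.2 <;> simp [hp]
    · simp only [Bool.not_eq_true] at hc
      rw [PySem.Dict.keys_insert_of_not_contains _ _ hc, List.map_append, List.sum_append]
      have hmemkeys : e.1.2 ∉ (pvIngS M).keys := by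
        intro hm
        exact absurd ((PySem.Dict.contains_iff_mem_keys _ _).mpr hm) (by simp [hc])
      have hcongr : (pvIngS M).keys.map (fun act => if p act then (0 : Int) else
            pvITot ((pvIngS M).insert e.1.2
              (((pvIngS M).getD e.1.2 PySem.Dict.empty).insert e.1.1 e.2)) act)
          = (pvIngS M).keys.map (fun act => if p act then (0 : Int) else pvITot (pvIngS M) act) := by
        apply List.map_congr_left
        intro x hx
        have hxne : x ≠ e.1.2 := fun h => hmemkeys (h ▸ hx)
        have : ((pvIngS M).insert e.1.2
            (((pvIngS M).getD e.1.2 PySem.Dict.empty).insert e.1.1 e.2)).getD x PySem.Dict.empty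
            = (pvIngS M).getD x PySem.Dict.empty :=
          PySem.Dict.getD_insert_of_ne _ _ _ hxne
        simp only [pvITot, this]
      rw [hcongr]
      have hnew : pvITot ((pvIngS M).insert e.1.2
            (((pvIngS M).getD e.1.2 PySem.Dict.empty).insert e.1.1 e.2)) e.1.2 = e.2 := by
        have hempty : (pvIngS M).getD e.1.2 PySem.Dict.empty = PySem.Dict.empty :=
          PySem.Dict.getD_of_not_contains _ _ hc
        simp only [pvITot, PySem.Dict.getD_insert_self, hempty,
          pv_itot_insert_fresh PySem.Dict.empty _ _ (PySem.Dict.contains_empty _)]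
        simp [PySem.Dict.keys, PySem.Dict.empty]
      simp [hnew]

lemma pv_sources_eq_outgoing (d : PySem.Dict (String × String) Int) (act : String) :
    PySem.Set.contains (d.keys.foldl (fun s el => PySem.Set.add s el.1) PySem.Set.empty) act
      = (pvOutgoing d).contains act := by
  rw [Bool.eq_iff_iff, PySem.Set.contains_iff, PySem.Set.mem_foldl_add, contains_pvOutgoing]
  simp [PySem.Set.empty, eq_comm]

lemma pv_assemble (d : PySem.Dict (String × String) Int) (hnd : d.keys.Nodup) :
    (pvIngoing d).keys.foldl (fun sum_values act =>
        if (pvOutgoing d).contains act then sum_values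
        else ((pvIngoing d).getD act PySem.Dict.empty).keys.foldl
          (fun s act2 => s + ((pvIngoing d).getD act PySem.Dict.empty).getD act2 0) sum_values) 0
      = d.keys.foldl (fun total el =>
          if PySem.Set.contains (d.keys.foldl (fun s el => PySem.Set.add s el.1) PySem.Set.empty) el.2
          then total else total + d.getD el 0) 0 := by
  rw [pvIngoing_eq d hnd]
  -- A side: turn the nested fold into a sum over the ingoing keys
  have hA : (pvIngS d.items).keys.foldl (fun sum_values act =>
        if (pvOutgoing d).contains act then sum_values
        else ((pvIngS d.items).getD act PySem.Dict.empty).keys.foldl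
          (fun s act2 => s + ((pvIngS d.items).getD act PySem.Dict.empty).getD act2 0) sum_values) 0
      = ((pvIngS d.items).keys.map (fun act =>
          if (pvOutgoing d).contains act then (0 : Int)
          else pvITot (pvIngS d.items) act)).sum := by
    rw [PySem.List.foldl_congr_mem _ _
      (fun acc act => acc + (if (pvOutgoing d).contains act then (0 : Int)
        else pvITot (pvIngS d.items) act)) 0
      (by
        intro acc act _
        by_cases hp : (pvOutgoing d).contains act
        · simp [hp]
        · simp only [hp, Bool.false_eq_true, if_false,
            PySem.List.foldl_add, pvITot])]
    rw [PySem.List.foldl_add]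
    simp
  -- B side: same sum, over the edge list
  have hB : d.keys.foldl (fun total el =>
        if PySem.Set.contains (d.keys.foldl (fun s el => PySem.Set.add s el.1) PySem.Set.empty) el.2
        then total else total + d.getD el 0) 0
      = (d.items.map (fun e =>
          if (pvOutgoing d).contains e.1.2 then (0 : Int) else e.2)).sum := by
    simp only [pv_sources_eq_outgoing]
    have hkeys : d.keys = d.items.map Prod.fst := rfl
    rw [hkeys, List.foldl_map]
    rw [PySem.List.foldl_congr_mem _ _
      (fun total e => total + (if (pvOutgoing d).contains e.1.2 then (0 : Int) else e.2)) 0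
      (by
        intro acc e he
        have hv : d.getD e.1 0 = e.2 :=
          PySem.Dict.getD_of_mem_items d (by simpa using he) hnd 0
        by_cases hp : (pvOutgoing d).contains e.1.2
        · simp [hp]
        · simp [hp, hv])]
    rw [PySem.List.foldl_add]
    simp
  rw [hA, hB]
  exact pv_main d.items (fun act => (pvOutgoing d).contains act) hnd

-- ===== VERDICT (by name: the statement is the Claim_ definition above) =====
theorem sum_end_activities_count_spec : Claim_equal_sum_end_activities_count := by
  intro dfg _hdom
  unfold Spec_sum_end_activities_count sum_end_activities_count sum_end_activities_count_alt
  exact pv_assemble _ (PySem.Dict.nodup_keys_ofList _)
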